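-- pv_equiv track=rewrite | github.com/EvgeniiTitov/msg-processor-v1 | message_validator.py | validate_message
-- ===== SOURCE A (Python) =====
-- def validate_message(message: str) -> bool:
--     if not message:
--         return False
--
--     tokens = message.split(";")
--
--     if len(tokens) != 3:
--         return False
--     if any(not len(t) for t in tokens):
--         return False
--     return True
-- ===== SOURCE B (Python) =====
-- def validate_message(message: str) -> bool:
--     return (message.count(";") == 2
--             and not message.startswith(";")
--             and not message.endswith(";")
--             and ";;" not in message)
-- ===== Notes on version B (the rewrite author's own statement) =====
-- stated objective: simpler
-- what changed: Replaces the split-into-tokens / length-check / emptiness-scan branch chain by a single boolean expression -- exactly two semicolons, none at either end and none adjacent -- which characterises the valid messages without ever building the token list.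
import Mathlib
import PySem

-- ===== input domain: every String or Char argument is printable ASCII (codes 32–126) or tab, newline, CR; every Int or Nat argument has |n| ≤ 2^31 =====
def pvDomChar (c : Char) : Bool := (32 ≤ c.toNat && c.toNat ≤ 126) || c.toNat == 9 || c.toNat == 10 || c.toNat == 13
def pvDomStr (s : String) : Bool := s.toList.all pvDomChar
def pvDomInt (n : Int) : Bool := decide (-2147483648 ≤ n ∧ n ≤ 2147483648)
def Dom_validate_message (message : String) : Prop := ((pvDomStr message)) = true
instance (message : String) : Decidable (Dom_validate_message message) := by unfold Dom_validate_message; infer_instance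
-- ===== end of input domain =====

-- B replaces A's split/length/emptiness branch chain by one boolean expression
-- (two semicolons, none at either end, none adjacent); same cost, simpler shape.

-- ===== PORT A =====
def validate_message (message : String) : Bool :=
  if PySem.Str.len message == 0 then false
  else
    let tokens := (PySem.Str.split? message ";").getD []
    if tokens.length != 3 then false
    else if tokens.any (fun t => PySem.Str.len t == 0) then false
    else true

-- ===== PORT B =====
def validate_message_alt (message : String) : Bool :=
  PySem.Str.count message ";" == 2
    && !(PySem.Str.startswith message ";")
    && !(PySem.Str.endswith message ";")
    && !(PySem.Str.isIn ";;" message)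

-- ===== PRECONDITION & SPEC =====
def Spec_validate_message (message : String) (out : Bool) : Prop := out = validate_message_alt message
instance (message : String) (out : Bool) : Decidable (Spec_validate_message message out) := by unfold Spec_validate_message; infer_instance

-- ===== CLAIM (what is proved, stated in full; the proofs are below) =====
def Claim_equal_validate_message : Prop := ∀ (message : String), Dom_validate_message message → Spec_validate_message message (validate_message message)

-- ===== LEMMAS AND PROOFS =====

-- structural reformulation of PySem.Chars.splitOn.go for the single-char separator ';'
def splitAuxSemi : List Char → List Char → List (List Char)
  | [], cur => [cur.reverse]
  | c :: rest, cur => if c = ';' then cur.reverse :: splitAuxSemi rest [] else splitAuxSemi rest (c :: cur)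

-- "some produced token is empty", given whether the current token is empty
def badSemi : List Char → Bool → Bool
  | [], e => e
  | c :: rest, e => if c = ';' then (e || badSemi rest true) else badSemi rest false

theorem splitOn_go_eq (l : List Char) : ∀ (fuel : Nat) (cur : List Char) (acc : List (List Char)),
    l.length ≤ fuel →
    PySem.Chars.splitOn.go [';'] fuel l cur acc = acc.reverse ++ splitAuxSemi l cur := by
  induction l with
  | nil =>
    intro fuel cur acc _
    cases fuel <;> simp [PySem.Chars.splitOn.go, splitAuxSemi]
  | cons c rest ih =>
    intro fuel cur acc h
    cases fuel with
    | zero => simp at h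
    | succ f =>
      have hf : rest.length ≤ f := by simpa using h
      by_cases hc : c = ';'
      · subst hc
        simp [PySem.Chars.splitOn.go, List.isPrefixOf, splitAuxSemi, ih f _ _ hf]
      · have hbe : ([';'].isPrefixOf (c :: rest)) = false := by
          simp [List.isPrefixOf]; exact fun h => hc h.symm
        simp [PySem.Chars.splitOn.go, hbe, hc, splitAuxSemi, ih f _ _ hf]

theorem splitOn_semi_eq (cs : List Char) :
    PySem.Chars.splitOn cs [';'] = splitAuxSemi cs [] := by
  unfold PySem.Chars.splitOn
  simpa using splitOn_go_eq cs (cs.length + 1) [] [] (by omega)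

theorem length_splitAuxSemi (l : List Char) : ∀ cur, (splitAuxSemi l cur).length = 1 + l.count ';' := by
  induction l with
  | nil => intro cur; simp [splitAuxSemi]
  | cons c rest ih =>
    intro cur
    by_cases hc : c = ';'
    · subst hc; simp [splitAuxSemi, ih]; omega
    · simp [splitAuxSemi, hc, ih]

theorem count_go_eq (l : List Char) : ∀ (fuel : Nat) (acc : Nat), l.length ≤ fuel →
    PySem.Chars.count.go [';'] fuel l acc = acc + l.count ';' := by
  induction l with
  | nil => intro fuel acc _; cases fuel <;> simp [PySem.Chars.count.go]
  | cons c rest ih =>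
    intro fuel acc h
    cases fuel with
    | zero => simp at h
    | succ f =>
      have hf : rest.length ≤ f := by simpa using h
      by_cases hc : c = ';'
      · subst hc
        simp [PySem.Chars.count.go, List.isPrefixOf, ih f _ hf]
        omega
      · have hbe : ([';'].isPrefixOf (c :: rest)) = false := by
          simp [List.isPrefixOf]; exact fun h => hc h.symm
        simp [PySem.Chars.count.go, hbe, ih f _ hf, hc]

theorem count_semi_eq (cs : List Char) : PySem.Chars.count cs [';'] = cs.count ';' := by
  unfold PySem.Chars.count
  simpa using count_go_eq cs cs.length 0 le_rfl

theorem any_splitAuxSemi (l : List Char) : ∀ cur,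
    (splitAuxSemi l cur).any (fun t => t.length == 0) = badSemi l cur.isEmpty := by
  induction l with
  | nil => intro cur; cases cur <;> simp [splitAuxSemi, badSemi]
  | cons c rest ih =>
    intro cur
    by_cases hc : c = ';'
    · subst hc
      cases cur <;> simp [splitAuxSemi, badSemi, ih]
    · simp [splitAuxSemi, hc, badSemi, ih]

theorem badSemi_iff (l : List Char) :
    (badSemi l false = true ↔ ([';'] <:+ l ∨ [';', ';'] <:+: l)) ∧
    (badSemi l true = true ↔ (l = [] ∨ [';'] <+: l ∨ [';'] <:+ l ∨ [';', ';'] <:+: l)) := by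
  induction l with
  | nil => simp [badSemi]
  | cons c rest ih =>
    obtain ⟨ihf, iht⟩ := ih
    by_cases hc : c = ';'
    · subst hc
      constructor
      · rw [show badSemi (';' :: rest) false = badSemi rest true from by simp [badSemi], iht]
        constructor
        · rintro (h | h | h | h)
          · left; simp [h]
          · right
            rw [List.infix_cons_iff]
            left
            exact List.cons_prefix_cons.mpr ⟨rfl, h⟩
          · left; exact h.trans (List.suffix_cons ';' rest)
          · right; exact List.infix_cons_iff.mpr (Or.inr h)
        · rintro (h | h)
          · rcases List.suffix_cons_iff.mp h with h | h
            · left; simpa using congrArg List.tail h.symm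
            · right; right; left; exact h
          · rcases List.infix_cons_iff.mp h with h | h
            · right; left; exact (List.cons_prefix_cons.mp h).2
            · right; right; right; exact h
      · simp [badSemi]
    · have hpc : ¬ ([';'] <+: c :: rest) := fun h => hc (List.cons_prefix_cons.mp h).1.symm
      have hsc : ([';'] <:+ c :: rest) ↔ [';'] <:+ rest := by
        rw [List.suffix_cons_iff]
        constructor
        · rintro (h | h)
          · exact absurd (by simpa using congrArg List.head? h.symm) hc
          · exact h
        · exact Or.inr
      have hic : ([';', ';'] <:+: c :: rest) ↔ [';', ';'] <:+: rest := by
        rw [List.infix_cons_iff]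
        constructor
        · rintro (h | h)
          · exact absurd (List.cons_prefix_cons.mp h).1.symm hc
          · exact h
        · exact Or.inr
      constructor
      · rw [show badSemi (c :: rest) false = badSemi rest false from by simp [badSemi, hc], ihf]
        simp [hsc, hic]
      · rw [show badSemi (c :: rest) true = badSemi rest false from by simp [badSemi, hc], ihf]
        simp [hsc, hic, hpc]

-- ===== VERDICT (by name: the statement is the Claim_ definition above) =====
theorem validate_message_spec : Claim_equal_validate_message := by
  intro message _
  unfold Spec_validate_message validate_message validate_message_alt
  obtain ⟨ts, hts, hmap⟩ : ∃ ts, PySem.Str.split? message ";" = some ts ∧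
      ts.map String.toList = splitAuxSemi message.toList [] := by
    have h := PySem.Str.split?_map message ";"
    have h2 : PySem.Chars.split? message.toList (";" : String).toList
        = some (splitAuxSemi message.toList []) := by
      rw [show (";" : String).toList = [';'] from rfl]
      simp [PySem.Chars.split?, splitOn_semi_eq]
    rw [h2] at h
    obtain ⟨ts, hts2, hmap2⟩ := Option.map_eq_some_iff.mp h
    exact ⟨ts, hts2, hmap2⟩
  obtain ⟨hbf, hbt⟩ := badSemi_iff message.toList
  have hany : (ts.any fun t => PySem.Str.len t == 0) = badSemi message.toList true := by
    have h1 : (ts.any fun t => PySem.Str.len t == 0)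
        = (ts.map String.toList).any (fun t => t.length == 0) := by
      rw [List.any_map]
      refine List.any_congr rfl (fun t => ?_)
      simp [PySem.Str.len_eq]
    rw [h1, hmap, any_splitAuxSemi]
    rfl
  have hlen3 : ts.length = 1 + message.toList.count ';' := by
    have := congrArg List.length hmap
    simpa [length_splitAuxSemi] using this
  have hcnt : PySem.Str.count message ";" = message.toList.count ';' := by
    rw [PySem.Str.count_eq, show (";" : String).toList = [';'] from rfl, count_semi_eq]
  rw [hts]
  simp only [Option.getD_some, hany, hlen3, hcnt]
  by_cases hnil : message.toList = []
  · have hc1 : (PySem.Str.len message == (0 : Int)) = true := by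
      simp [PySem.Str.len_eq, hnil]
    rw [hc1, if_pos rfl]
    simp [hnil]
  · have hc1 : (PySem.Str.len message == (0 : Int)) = false := by
      simp [PySem.Str.len_eq]
      exact fun h => hnil (by rw [h]; rfl)
    rw [hc1, if_neg (by simp)]
    by_cases h2 : message.toList.count ';' = 2
    · have h3 : (1 + message.toList.count ';' != 3) = false := by simp [h2]
      rw [h3, if_neg (by simp)]
      cases hbad : badSemi message.toList true with
      | false =>
        have hbad' : ¬ badSemi message.toList true = true := by simp [hbad]
        have h1 : PySem.Chars.startswith message.toList [';'] = false :=
          Bool.eq_false_iff.mpr (fun h =>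
            hbad' (hbt.mpr (Or.inr (Or.inl ((PySem.Chars.startswith_iff _ _).mp h)))))
        have h4 : PySem.Chars.endswith message.toList [';'] = false :=
          Bool.eq_false_iff.mpr (fun h =>
            hbad' (hbt.mpr (Or.inr (Or.inr (Or.inl ((PySem.Chars.endswith_iff _ _).mp h))))))
        have h5 : PySem.Chars.isIn [';', ';'] message.toList = false :=
          Bool.eq_false_iff.mpr (fun h =>
            hbad' (hbt.mpr (Or.inr (Or.inr (Or.inr ((PySem.Chars.isIn_iff_infix _ _).mp h))))))
        simp [h1, h4, h5, h2]
      | true =>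
        rw [if_pos rfl]
        rcases hbt.mp hbad with h | h | h | h
        · exact absurd h hnil
        · have h1 : PySem.Chars.startswith message.toList [';'] = true :=
            (PySem.Chars.startswith_iff _ _).mpr h
          simp [h1]
        · have h1 : PySem.Chars.endswith message.toList [';'] = true :=
            (PySem.Chars.endswith_iff _ _).mpr h
          simp [h1]
        · have h1 : PySem.Chars.isIn [';', ';'] message.toList = true :=
            (PySem.Chars.isIn_iff_infix _ _).mpr h
          simp [h1]
    · have h3 : (1 + message.toList.count ';' != 3) = true := by
        simp
        omega
      rw [h3, if_pos rfl]
      simp [h2]
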